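-- pv_equiv track=rewrite | github.com/sijapu17/Advent-of-Code | 2016/2016-7.py | bab
-- ===== SOURCE A (Python) =====
-- def bab(lst,abas):
--     if len(abas)>0:
--         for aba in abas:
--             bab=aba[1]+aba[0]+aba[1]
--             for each in lst:
--                 if bab in each:
--                     return(True)
--     return(False)
-- ===== SOURCE B (Python) =====
-- def bab(lst, abas):
--     # build the set of all length-3 windows of lst once, then one lookup per aba
--     windows = {s[i:i + 3] for s in lst for i in range(len(s) - 2)}
--     for aba in abas:
--         if aba[1] + aba[0] + aba[1] in windows:
--             return True
--     return False
-- ===== Notes on version B (the rewrite author's own statement) =====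
-- stated objective: faster
-- what changed: Instead of re-scanning every string of lst for each aba, B precomputes the set of all length-3 substrings of lst once and answers each aba with one hash lookup.
-- outside the precondition, e.g. on bab(['xyx'], ['yxy', 'a']): A returns True, B returns True
import Mathlib
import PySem

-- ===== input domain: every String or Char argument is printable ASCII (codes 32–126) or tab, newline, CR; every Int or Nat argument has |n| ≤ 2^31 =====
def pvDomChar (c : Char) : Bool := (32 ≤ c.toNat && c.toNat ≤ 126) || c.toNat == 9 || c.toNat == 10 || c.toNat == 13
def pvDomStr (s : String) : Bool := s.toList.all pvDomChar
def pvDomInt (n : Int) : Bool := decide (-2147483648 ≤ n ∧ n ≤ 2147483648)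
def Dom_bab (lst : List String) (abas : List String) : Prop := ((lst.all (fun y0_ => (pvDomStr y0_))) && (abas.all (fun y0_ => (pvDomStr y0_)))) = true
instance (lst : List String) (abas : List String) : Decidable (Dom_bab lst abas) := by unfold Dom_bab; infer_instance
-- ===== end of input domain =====

-- B precomputes the set of all length-3 substrings of lst once, replacing A's
-- rescans of lst for every aba (objective: faster, one pass over lst).


-- ===== PORT A =====
-- bab = aba[1] + aba[0] + aba[1]; none = IndexError (aba shorter than 2), excluded by Pre_bab
def bab (lst : List String) (abas : List String) : Bool :=
  if abas.length > 0 then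
    abas.any (fun aba =>
      match PySem.Str.pyGet? aba 1, PySem.Str.pyGet? aba 0 with
      | some c1, some c0 =>
          lst.any (fun each => PySem.Str.isIn (String.ofList [c1, c0, c1]) each)
      | _, _ => false)
  else false

-- ===== PORT B =====
-- windows = {s[i:i+3] for s in lst for i in range(len(s)-2)}
def babWindows (lst : List String) : PySem.Set String :=
  PySem.Set.ofList (lst.flatMap (fun s =>
    (PySem.List.pyRange 0 (PySem.Str.len s - 2)).map (fun i =>
      PySem.Str.slice s (some i) (some (i + 3)))))

def bab_alt (lst : List String) (abas : List String) : Bool :=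
  let windows := babWindows lst
  abas.any (fun aba =>
    (((PySem.Str.pyGet? aba 1).bind (fun c1 =>
        (PySem.Str.pyGet? aba 0).map (fun c0 =>
          PySem.Set.contains windows (String.ofList [c1, c0, c1])))).getD false))

-- ===== PRECONDITION & SPEC =====
-- A raises IndexError on any aba of length < 2 it reaches; Pre_ requires all abas to have
-- length ≥ 2, which also excludes some inputs where A returns True before reaching a short
-- aba (on those B returns the same True, so the exclusion is only for simplicity of Pre_).
def Pre_bab (lst : List String) (abas : List String) : Prop :=
  ∀ aba ∈ abas, 2 ≤ aba.toList.length
instance (lst : List String) (abas : List String) : Decidable (Pre_bab lst abas) := by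
  unfold Pre_bab; infer_instance

def pvWitness_bab : List String × List String := (["xyx", "ab"], ["yxy", "zz"])

def Spec_bab (lst : List String) (abas : List String) (out : Bool) : Prop := out = bab_alt lst abas
instance (lst : List String) (abas : List String) (out : Bool) : Decidable (Spec_bab lst abas out) := by unfold Spec_bab; infer_instance

-- ===== CLAIM (what is proved, stated in full; the proofs are below) =====
def Claim_equal_bab : Prop := ∀ (lst : List String) (abas : List String), Dom_bab lst abas → Pre_bab lst abas → Spec_bab lst abas (bab lst abas)

-- ===== LEMMAS AND PROOFS =====

-- a length-3 substring occurs in s iff it is one of the length-3 windows of s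
theorem isIn_iff_mem_windows (b s : String) (hb : b.toList.length = 3) :
    PySem.Str.isIn b s = true ↔
      b ∈ (PySem.List.pyRange 0 (PySem.Str.len s - 2)).map (fun i =>
            PySem.Str.slice s (some i) (some (i + 3))) := by
  rw [PySem.Str.isIn_eq, ← PySem.Chars.exists_prefix_drop_iff_isIn, List.mem_map]
  have h3 : ∀ j : Nat, ((j : Int) + 3) = ((j : Int) + ((3 : Nat) : Int)) := by intro j; norm_num
  constructor
  · rintro ⟨j, hj⟩
    have hjlen : j + 3 ≤ s.toList.length := by
      have := hj.length_le
      simp only [List.length_drop, hb] at this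
      omega
    refine ⟨(j : Int), ?_, ?_⟩
    · rw [PySem.List.mem_pyRange_one, PySem.Str.len_eq]
      refine ⟨Int.natCast_nonneg j, ?_⟩
      omega
    · apply String.toList_inj.mp
      rw [PySem.Str.toList_slice, PySem.Chars.slice_eq_listSlice, h3 j,
          PySem.List.slice_natCast_add]
      have hpt := List.prefix_iff_eq_take.mp hj
      rw [hb] at hpt
      exact hpt.symm
  · rintro ⟨i, hi, heq⟩
    rw [PySem.List.mem_pyRange_one, PySem.Str.len_eq] at hi
    obtain ⟨h0, hlt⟩ := hi
    lift i to Nat using h0 with j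
    refine ⟨j, ?_⟩
    rw [List.prefix_iff_eq_take, hb]
    have hteq := congrArg String.toList heq
    rw [PySem.Str.toList_slice, PySem.Chars.slice_eq_listSlice, h3 j,
        PySem.List.slice_natCast_add] at hteq
    exact hteq.symm

theorem any_isIn_eq_contains (lst : List String) (b : String) (hb : b.toList.length = 3) :
    lst.any (fun each => PySem.Str.isIn b each) =
      PySem.Set.contains (babWindows lst) b := by
  rw [PySem.Set.contains_eq_decide]
  unfold babWindows
  rw [Bool.eq_iff_iff, List.any_eq_true, decide_eq_true_iff,
      PySem.Set.mem_ofList, List.mem_flatMap]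
  constructor
  · rintro ⟨s, hs, h⟩
    exact ⟨s, hs, (isIn_iff_mem_windows b s hb).mp h⟩
  · rintro ⟨s, hs, h⟩
    exact ⟨s, hs, (isIn_iff_mem_windows b s hb).mpr h⟩

-- ===== VERDICT (by name: the statement is the Claim_ definition above) =====
theorem bab_spec : Claim_equal_bab := by
  intro lst abas _ hpre
  unfold Spec_bab bab bab_alt
  cases abas with
  | nil => simp
  | cons a t =>
    simp only [List.length_cons, if_pos (Nat.succ_pos t.length)]
    apply PySem.List.any_congr_mem
    intro aba hmem
    have hlen : 2 ≤ aba.toList.length := hpre aba hmem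
    obtain ⟨c0, c1, rest, hsh⟩ : ∃ c0 c1 rest, aba.toList = c0 :: c1 :: rest := by
      match h : aba.toList with
      | [] => rw [h] at hlen; simp at hlen
      | [c] => rw [h] at hlen; simp at hlen
      | c0 :: c1 :: rest => exact ⟨c0, c1, rest, rfl⟩
    have h1 : PySem.Str.pyGet? aba 1 = some c1 := by
      have := PySem.Str.pyGet?_natCast aba 1
      simp only [Nat.cast_one] at this
      rw [this, hsh]; rfl
    have h0 : PySem.Str.pyGet? aba 0 = some c0 := by
      have := PySem.Str.pyGet?_natCast aba 0
      simp only [Nat.cast_zero] at this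
      rw [this, hsh]; rfl
    rw [h0, h1]
    show lst.any _ = ((some c1).bind (fun c1 =>
        (some c0).map (fun c0 =>
          PySem.Set.contains (babWindows lst) (String.ofList [c1, c0, c1])))).getD false
    rw [Option.bind_some, Option.map_some, Option.getD_some]
    exact any_isIn_eq_contains lst (String.ofList [c1, c0, c1]) (by simp)
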